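-- pv_equiv track=rewrite | github.com/oltapllana/golf-sudoku-latin-ai | detyra3.py | iddfs_latin_square
-- ===== SOURCE A (Python) =====
-- def iddfs_latin_square(n):
--     """
--     Generates a Latin Square using Iterative Deepening Depth-First Search (IDDFS).
--
--     Parameters:
--         n (int): The order of the Latin Square (n x n).
--
--     Returns:
--         list: A 2D list representing the Latin Square if found, else None.
--     """
--     max_depth = n * n
--
--     for depth_limit in range(1, max_depth + 1):
--
--         grid = [[0] * n for _ in range(n)]
--
--         row_sets = [set() for _ in range(n)]
--
--
--         col_sets = [set() for _ in range(n)]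
--
--         if iddfs_dls(grid, row_sets, col_sets, 0, depth_limit, n):
--             return grid
--
--     return None
--
-- def iddfs_dls(grid, row_sets, col_sets, cell_index, depth_limit, n):
--     """
--     Performs Depth-Limited Search (DLS) for IDDFS.
--
--     Parameters:
--         grid (list): The current state of the Latin Square grid.
--         row_sets (list): List of sets tracking used numbers in each row.
--         col_sets (list): List of sets tracking used numbers in each column.
--         cell_index (int): The current cell index being filled (0 to n*n - 1).
--         depth_limit (int): The current depth limit for IDDFS.
--         n (int): The order of the Latin Square.
--
--     Returns:
--         bool: True if a solution is found, else False.
--     """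
--
--     if cell_index == n * n:
--         return True
--
--
--     if cell_index >= depth_limit:
--         return False
--
--
--     row = cell_index // n
--     col = cell_index % n
--
--     for num in range(1, n + 1):
--
--         if num not in row_sets[row] and num not in col_sets[col]:
--
--             grid[row][col] = num
--
--             row_sets[row].add(num)
--             col_sets[col].add(num)
--
--             if iddfs_dls(grid, row_sets, col_sets, cell_index + 1, depth_limit, n):
--                 return True
--
--             grid[row][col] = 0
--             row_sets[row].remove(num)
--             col_sets[col].remove(num)
--
--     return False
-- ===== SOURCE B (Python) =====
-- def iddfs_latin_square(n):
--     # Single full-depth iterative backtracker (explicit resume index instead of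
--     # IDDFS + recursion); candidate checks scan the grid directly, no aux sets.
--     if n <= 0:
--         return None
--     total = n * n
--     grid = [[0] * n for _ in range(n)]
--     ci = 0      # next cell to fill, row-major
--     start = 1   # smallest candidate still untried at cell ci
--     while ci != total:
--         r, c = divmod(ci, n)
--         num = start
--         while num <= n and (num in grid[r] or any(grid[i][c] == num for i in range(n))):
--             num += 1
--         if num <= n:
--             grid[r][c] = num
--             ci += 1
--             start = 1
--         else:
--             if ci == 0:
--                 return None
--             ci -= 1
--             r, c = divmod(ci, n)
--             start = grid[r][c] + 1
--             grid[r][c] = 0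
--     return grid
-- ===== Notes on version B (the rewrite author's own statement) =====
-- stated objective: faster
-- what changed: Replaces iterative-deepening (a fresh recursive, set-tracking depth-limited DFS restarted for every depth limit 1..n*n) by one iterative resume-index backtracking pass over the grid itself: only the full-depth pass can ever succeed, so the deepening loop is dropped, the recursion becomes an explicit cell-index loop, and the row/column sets are replaced by direct grid scans.
import Mathlib
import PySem

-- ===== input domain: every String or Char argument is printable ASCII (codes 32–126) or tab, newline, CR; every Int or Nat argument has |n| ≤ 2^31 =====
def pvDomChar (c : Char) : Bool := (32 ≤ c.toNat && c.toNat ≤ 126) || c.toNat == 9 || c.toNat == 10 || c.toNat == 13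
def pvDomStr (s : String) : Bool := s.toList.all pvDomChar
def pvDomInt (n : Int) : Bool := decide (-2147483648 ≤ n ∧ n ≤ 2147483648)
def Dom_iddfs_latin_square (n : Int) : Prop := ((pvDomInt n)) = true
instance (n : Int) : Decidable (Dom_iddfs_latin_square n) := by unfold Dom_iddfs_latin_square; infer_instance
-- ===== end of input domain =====

-- B drops A's iterative-deepening loop (only the full-depth pass can succeed) and replaces the
-- recursive set-tracking DFS by an iterative resume-index backtracker scanning the grid directly.

-- ===== PORT A =====
-- state (grid, row_sets, col_sets) threaded through the search (Python mutates these in place;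
-- the function's RETURN value is what is compared here — A's caller passes fresh objects).
abbrev StA := List (List Int) × List (PySem.Set Int) × List (PySem.Set Int)

mutual
/-- `iddfs_dls`; the Nat fuel only drives the recursion: each level consumes one unit and the
top call passes `(n*n).toNat ≥ depth_limit - cell_index`, so the `0` branch is unreachable. -/
def dlsA (fuel : Nat) (st : StA) (ci dl n : Int) : Bool × StA :=
  if ci = n * n then (true, st)
  else if ci ≥ dl then (false, st)
  else
    let row := PySem.Int.floordiv ci n
    let col := PySem.Int.mod ci n
    match fuel with
    | 0 => (false, st)
    | f + 1 => loopA f (PySem.List.pyRange 1 (n + 1) 1) st row col ci dl n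

/-- the `for num in range(1, n+1)` loop inside `iddfs_dls` -/
def loopA (fuel : Nat) (nums : List Int) (st : StA) (row col ci dl n : Int) : Bool × StA :=
  match nums with
  | [] => (false, st)
  | num :: rest =>
    if !(PySem.Set.contains (PySem.List.pyGetD st.2.1 row PySem.Set.empty) num)
        && !(PySem.Set.contains (PySem.List.pyGetD st.2.2 col PySem.Set.empty) num) then
      let st1 : StA :=
        (PySem.List.pySetD st.1 row (PySem.List.pySetD (PySem.List.pyGetD st.1 row []) col num),
         PySem.List.pySetD st.2.1 row (PySem.Set.add (PySem.List.pyGetD st.2.1 row PySem.Set.empty) num),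
         PySem.List.pySetD st.2.2 col (PySem.Set.add (PySem.List.pyGetD st.2.2 col PySem.Set.empty) num))
      match dlsA fuel st1 (ci + 1) dl n with
      | (true, st2) => (true, st2)
      | (false, st2) =>
        -- undo: grid[row][col] = 0; row_sets[row].remove(num); col_sets[col].remove(num)
        -- (num is in both sets on every executed path, so Python's KeyError branch of
        --  .remove is unreachable and the .getD default is never taken)
        let st3 : StA :=
          (PySem.List.pySetD st2.1 row (PySem.List.pySetD (PySem.List.pyGetD st2.1 row []) col 0),
           PySem.List.pySetD st2.2.1 row ((PySem.Set.remove? (PySem.List.pyGetD st2.2.1 row PySem.Set.empty) num).getD (PySem.List.pyGetD st2.2.1 row PySem.Set.empty)),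
           PySem.List.pySetD st2.2.2 col ((PySem.Set.remove? (PySem.List.pyGetD st2.2.2 col PySem.Set.empty) num).getD (PySem.List.pyGetD st2.2.2 col PySem.Set.empty)))
        loopA fuel rest st3 row col ci dl n
    else loopA fuel rest st row col ci dl n
end

/-- grid = [[0]*n …], row_sets = [set() …], col_sets = [set() …] -/
def initStA (n : Int) : StA :=
  ((PySem.List.pyRange 0 n 1).map (fun _ => List.replicate n.toNat 0),
   (PySem.List.pyRange 0 n 1).map (fun _ => (PySem.Set.empty : PySem.Set Int)),
   (PySem.List.pyRange 0 n 1).map (fun _ => (PySem.Set.empty : PySem.Set Int)))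

/-- the `for depth_limit in range(1, max_depth + 1)` loop with its early `return grid` -/
def outerA : List Int → Int → Option (List (List Int))
  | [], _ => none
  | dl :: rest, n =>
    match dlsA (n * n).toNat (initStA n) 0 dl n with
    | (true, st) => some st.1
    | (false, _) => outerA rest n

def iddfs_latin_square (n : Int) : Option (List (List Int)) :=
  outerA (PySem.List.pyRange 1 (n * n + 1) 1) n

-- ===== PORT B =====
/-- the inner `while num <= n and (num in grid[r] or any(grid[i][c] == num for i in range(n)))` -/
def nextFreeB (grid : List (List Int)) (r c num n : Int) : Int :=
  if h : num ≤ n ∧ ((PySem.List.pyGetD grid r []).contains num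
      || (PySem.List.pyRange 0 n 1).any
           (fun i => PySem.List.pyGetD (PySem.List.pyGetD grid i []) c 0 == num)) = true
  then nextFreeB grid r c (num + 1) n
  else num
termination_by (n + 1 - num).toNat
decreasing_by omega

/-- the `while ci != total` loop; the Nat fuel only drives the recursion: the top call passes
an upper bound on the number of iterations, so the `0` branch is unreachable. -/
def loopB : Nat → List (List Int) → Int → Int → Int → Int → Option (List (List Int))
  | 0, _, _, _, _, _ => none
  | fuel + 1, grid, ci, start, total, n =>
    if ci = total then some grid
    else
      let r := PySem.Int.floordiv ci n
      let c := PySem.Int.mod ci n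
      let num := nextFreeB grid r c start n
      if num ≤ n then
        loopB fuel (PySem.List.pySetD grid r (PySem.List.pySetD (PySem.List.pyGetD grid r []) c num)) (ci + 1) 1 total n
      else if ci = 0 then none
      else
        let ci' := ci - 1
        let r' := PySem.Int.floordiv ci' n
        let c' := PySem.Int.mod ci' n
        let v := PySem.List.pyGetD (PySem.List.pyGetD grid r' []) c' 0
        loopB fuel (PySem.List.pySetD grid r' (PySem.List.pySetD (PySem.List.pyGetD grid r' []) c' 0)) ci' (v + 1) total n

def iddfs_latin_square_alt (n : Int) : Option (List (List Int)) :=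
  if n ≤ 0 then none
  else
    loopB ((n.toNat + 2) ^ ((n * n).toNat + 1))
      ((PySem.List.pyRange 0 n 1).map (fun _ => List.replicate n.toNat 0)) 0 1 (n * n) n

-- ===== PRECONDITION & SPEC =====
def Spec_iddfs_latin_square (n : Int) (out : Option (List (List Int))) : Prop := out = iddfs_latin_square_alt n
instance (n : Int) (out : Option (List (List Int))) : Decidable (Spec_iddfs_latin_square n out) := by unfold Spec_iddfs_latin_square; infer_instance

-- ===== CLAIM (what is proved, stated in full; the proofs are below) =====
def Claim_equal_iddfs_latin_square : Prop := ∀ (n : Int), Dom_iddfs_latin_square n → Spec_iddfs_latin_square n (iddfs_latin_square n)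

-- ===== LEMMAS AND PROOFS =====

-- Spec-level description of the search states: `vs` is the list of placed values,
-- newest first, so `vs.length` is the index of the next cell to fill (row-major).

/-- value placed at cell `i` (0 if not placed): `vs` is newest-first -/
def aval (vs : List Int) (i : Nat) : Int := vs.reverse.getD i 0

def setCellN (nn : Nat) (g : List (List Int)) (i : Nat) (v : Int) : List (List Int) :=
  g.set (i / nn) ((g.getD (i / nn) []).set (i % nn) v)

def gridOf (nn : Nat) : List Int → List (List Int)
  | [] => List.replicate nn (List.replicate nn 0)
  | v :: vs => setCellN nn (gridOf nn vs) vs.length v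

def rowsOf (nn : Nat) : List Int → List (PySem.Set Int)
  | [] => List.replicate nn PySem.Set.empty
  | v :: vs => (rowsOf nn vs).set (vs.length / nn)
      (PySem.Set.add ((rowsOf nn vs).getD (vs.length / nn) PySem.Set.empty) v)

def colsOf (nn : Nat) : List Int → List (PySem.Set Int)
  | [] => List.replicate nn PySem.Set.empty
  | v :: vs => (colsOf nn vs).set (vs.length % nn)
      (PySem.Set.add ((colsOf nn vs).getD (vs.length % nn) PySem.Set.empty) v)

def stAOf (nn : Nat) (vs : List Int) : StA := (gridOf nn vs, rowsOf nn vs, colsOf nn vs)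

/-- A's inner loop, started at candidate `start`, at the state reached by placing `vs`,
with full depth limit and exactly sufficient fuel -/
def tryA (nn : Nat) (start : Int) (vs : List Int) : Bool × StA :=
  loopA (nn * nn) (PySem.List.pyRange start ((nn : Int) + 1) 1) (stAOf nn vs)
    (PySem.Int.floordiv (vs.length : Int) (nn : Int)) (PySem.Int.mod (vs.length : Int) (nn : Int))
    (vs.length : Int) ((nn : Int) * (nn : Int)) (nn : Int)

/-- result of backtracking through the pending alternatives recorded in `vs` -/
def unwind (nn : Nat) : List Int → Option (List (List Int))
  | [] => none
  | v :: vs =>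
    match tryA nn (v + 1) vs with
    | (true, st) => some st.1
    | (false, _) => unwind nn vs

/-- what A's full-depth search yields from the configuration (vs, start) -/
def ASide (nn : Nat) (vs : List Int) (start : Int) : Option (List (List Int)) :=
  if vs.length = nn * nn then some (gridOf nn vs)
  else
    match tryA nn start vs with
    | (true, st) => some st.1
    | (false, _) => unwind nn vs

/-- search-progress measure: the configuration read as a base-(nn+2) numeral -/
def mStk (nn : Nat) : List Int → Nat
  | [] => 0
  | v :: vs => v.toNat * (nn + 2) ^ (nn * nn - vs.length) + mStk nn vs

def mCfg (nn : Nat) (vs : List Int) (start : Int) : Nat :=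
  start.toNat * (nn + 2) ^ (nn * nn - vs.length) + mStk nn vs

def InvV (nn : Nat) (vs : List Int) : Prop :=
  vs.length ≤ nn * nn ∧ ∀ v ∈ vs, 1 ≤ v ∧ v ≤ (nn : Int)

lemma aval_cons (v : Int) (vs : List Int) (i : Nat) :
    aval (v :: vs) i = if i = vs.length then v else aval vs i := by
  unfold aval
  rw [List.reverse_cons]
  rcases lt_trichotomy i vs.length with h | h | h
  · rw [List.getD_append _ _ _ _ (by simpa using h), if_neg (by omega)]
  · subst h
    rw [List.getD_append_right _ _ _ _ (by simp), if_pos rfl]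
    simp
  · rw [if_neg (by omega), List.getD_eq_default _ _ (by simp; omega),
      List.getD_eq_default _ _ (by simpa using h.le)]

lemma length_gridOf (nn : Nat) (vs : List Int) : (gridOf nn vs).length = nn := by
  induction vs with
  | nil => simp [gridOf]
  | cons v vs ih => simpa [gridOf, setCellN] using ih

lemma getD_set_list {α : Type} (l : List α) (i j : Nat) (a d : α) :
    (l.set i a).getD j d = if i = j ∧ i < l.length then a else l.getD j d := by
  by_cases h1 : i = j
  · subst h1
    by_cases h2 : i < l.length
    · simp [List.getD, h2]
    · simp [List.getD, h2]
  · simp [List.getD, h1]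

lemma length_row_gridOf (nn : Nat) (vs : List Int) (r : Nat) (hr : r < nn) :
    ((gridOf nn vs).getD r []).length = nn := by
  induction vs with
  | nil => simp [gridOf, List.getD, hr]
  | cons v vs ih =>
    rw [gridOf, setCellN, getD_set_list]
    split_ifs with h
    · rw [List.length_set, h.1]; exact ih
    · exact ih

lemma cell_coords (nn i : Nat) (h : i < nn * nn) : i / nn < nn ∧ i % nn < nn := by
  have hnn : 0 < nn := Nat.pos_of_ne_zero (by rintro rfl; simp at h)
  exact ⟨Nat.div_lt_of_lt_mul h, Nat.mod_lt _ hnn⟩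

lemma coord_eq_iff (nn r c i : Nat) (_hr : r < nn) (hc : c < nn) :
    (i / nn = r ∧ i % nn = c) ↔ r * nn + c = i := by
  have hnn : 0 < nn := by omega
  constructor
  · rintro ⟨h1, h2⟩
    rw [← h1, ← h2, Nat.mul_comm]
    exact Nat.div_add_mod i nn
  · rintro rfl
    constructor
    · rw [Nat.add_comm, Nat.add_mul_div_right _ _ hnn, Nat.div_eq_of_lt hc, Nat.zero_add]
    · rw [Nat.add_comm, Nat.add_mul_mod_self_right, Nat.mod_eq_of_lt hc]

lemma entry_gridOf (nn : Nat) (vs : List Int) (hv : vs.length ≤ nn * nn)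
    (r c : Nat) (hr : r < nn) (hc : c < nn) :
    ((gridOf nn vs).getD r []).getD c 0 =
      if r * nn + c < vs.length then aval vs (r * nn + c) else 0 := by
  induction vs with
  | nil => simp [gridOf, List.getD, hr, hc]
  | cons v vs ih =>
    simp only [List.length_cons] at hv
    have hv' : vs.length ≤ nn * nn := by omega
    have hlt : vs.length < nn * nn := by omega
    obtain ⟨hr0, hc0⟩ := cell_coords nn vs.length hlt
    rw [gridOf, setCellN, getD_set_list]
    by_cases hrow : vs.length / nn = r ∧ vs.length / nn < (gridOf nn vs).length
    · rw [if_pos hrow, getD_set_list]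
      by_cases hcol : vs.length % nn = c ∧
          vs.length % nn < ((gridOf nn vs).getD (vs.length / nn) []).length
      · rw [if_pos hcol]
        have hidx : r * nn + c = vs.length :=
          (coord_eq_iff nn r c vs.length hr hc).1 ⟨hrow.1, hcol.1⟩
        rw [if_pos (by simp only [List.length_cons]; omega), hidx, aval_cons, if_pos rfl]
      · have hc2 : ¬ vs.length % nn = c := by
          intro hh
          exact hcol ⟨hh, by rw [hrow.1, length_row_gridOf nn vs r hr]; omega⟩
        have hne : ¬ r * nn + c = vs.length := by
          intro hh
          exact hc2 ((coord_eq_iff nn r c vs.length hr hc).2 hh).2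
        rw [if_neg hcol, hrow.1, ih hv']
        simp only [List.length_cons]
        rw [aval_cons]
        split_ifs <;> first | rfl | omega
    · have hr2 : ¬ vs.length / nn = r := by
        intro hh
        exact hrow ⟨hh, by rw [length_gridOf]; exact hr0⟩
      have hne : ¬ r * nn + c = vs.length := by
        intro hh
        exact hr2 ((coord_eq_iff nn r c vs.length hr hc).2 hh).1
      rw [if_neg hrow, ih hv']
      simp only [List.length_cons]
      rw [aval_cons]
      split_ifs <;> first | rfl | omega

lemma length_rowsOf (nn : Nat) (vs : List Int) : (rowsOf nn vs).length = nn := by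
  induction vs with
  | nil => simp [rowsOf]
  | cons v vs ih => rw [rowsOf, List.length_set]; exact ih

lemma length_colsOf (nn : Nat) (vs : List Int) : (colsOf nn vs).length = nn := by
  induction vs with
  | nil => simp [colsOf]
  | cons v vs ih => rw [colsOf, List.length_set]; exact ih

lemma mem_rowsOf (nn : Nat) (vs : List Int) (hv : vs.length ≤ nn * nn)
    (c : Nat) (hc : c < nn) (x : Int) :
    x ∈ (rowsOf nn vs).getD c PySem.Set.empty ↔
      ∃ i < vs.length, i / nn = c ∧ aval vs i = x := by
  induction vs with
  | nil => simp [rowsOf, List.getD, hc, PySem.Set.empty]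
  | cons v vs ih =>
    simp only [List.length_cons] at hv
    have hv' : vs.length ≤ nn * nn := by omega
    have hlt : vs.length < nn * nn := by omega
    have hlen : (rowsOf nn vs).length = nn := length_rowsOf nn vs
    rw [rowsOf, getD_set_list]
    split_ifs with h1
    · rw [h1.1, PySem.Set.mem_add, ih hv']
      constructor
      · rintro (⟨i, hi1, hi2, hi3⟩ | hx)
        · exact ⟨i, by simp only [List.length_cons]; omega, hi2,
            by rw [aval_cons, if_neg (by omega)]; exact hi3⟩
        · exact ⟨vs.length, by simp, h1.1, by rw [aval_cons, if_pos rfl]; exact hx.symm⟩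
      · rintro ⟨i, hi1, hi2, hi3⟩
        simp only [List.length_cons] at hi1
        rcases Nat.lt_succ_iff_lt_or_eq.1 hi1 with h | h
        · exact Or.inl ⟨i, h, hi2, by rw [aval_cons, if_neg (by omega)] at hi3; exact hi3⟩
        · subst h
          rw [aval_cons, if_pos rfl] at hi3
          exact Or.inr hi3.symm
    · have hrne : ¬ vs.length / nn = c := by
        intro hh
        exact h1 ⟨hh, by rw [hlen]; exact (cell_coords nn vs.length hlt).1⟩
      rw [ih hv']
      constructor
      · rintro ⟨i, hi1, hi2, hi3⟩
        exact ⟨i, by simp only [List.length_cons]; omega, hi2,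
          by rw [aval_cons, if_neg (by omega)]; exact hi3⟩
      · rintro ⟨i, hi1, hi2, hi3⟩
        simp only [List.length_cons] at hi1
        rcases Nat.lt_succ_iff_lt_or_eq.1 hi1 with h | h
        · exact ⟨i, h, hi2, by rw [aval_cons, if_neg (by omega)] at hi3; exact hi3⟩
        · subst h; exact absurd hi2 hrne

lemma mem_colsOf (nn : Nat) (vs : List Int) (hv : vs.length ≤ nn * nn)
    (c : Nat) (hc : c < nn) (x : Int) :
    x ∈ (colsOf nn vs).getD c PySem.Set.empty ↔
      ∃ i < vs.length, i % nn = c ∧ aval vs i = x := by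
  induction vs with
  | nil => simp [colsOf, List.getD, hc, PySem.Set.empty]
  | cons v vs ih =>
    simp only [List.length_cons] at hv
    have hv' : vs.length ≤ nn * nn := by omega
    have hlt : vs.length < nn * nn := by omega
    have hlen : (colsOf nn vs).length = nn := length_colsOf nn vs
    rw [colsOf, getD_set_list]
    split_ifs with h1
    · rw [h1.1, PySem.Set.mem_add, ih hv']
      constructor
      · rintro (⟨i, hi1, hi2, hi3⟩ | hx)
        · exact ⟨i, by simp only [List.length_cons]; omega, hi2,
            by rw [aval_cons, if_neg (by omega)]; exact hi3⟩
        · exact ⟨vs.length, by simp, h1.1, by rw [aval_cons, if_pos rfl]; exact hx.symm⟩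
      · rintro ⟨i, hi1, hi2, hi3⟩
        simp only [List.length_cons] at hi1
        rcases Nat.lt_succ_iff_lt_or_eq.1 hi1 with h | h
        · exact Or.inl ⟨i, h, hi2, by rw [aval_cons, if_neg (by omega)] at hi3; exact hi3⟩
        · subst h
          rw [aval_cons, if_pos rfl] at hi3
          exact Or.inr hi3.symm
    · have hrne : ¬ vs.length % nn = c := by
        intro hh
        exact h1 ⟨hh, by rw [hlen]; exact (cell_coords nn vs.length hlt).2⟩
      rw [ih hv']
      constructor
      · rintro ⟨i, hi1, hi2, hi3⟩
        exact ⟨i, by simp only [List.length_cons]; omega, hi2,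
          by rw [aval_cons, if_neg (by omega)]; exact hi3⟩
      · rintro ⟨i, hi1, hi2, hi3⟩
        simp only [List.length_cons] at hi1
        rcases Nat.lt_succ_iff_lt_or_eq.1 hi1 with h | h
        · exact ⟨i, h, hi2, by rw [aval_cons, if_neg (by omega)] at hi3; exact hi3⟩
        · subst h; exact absurd hi2 hrne

-- the used-candidate tests of the two programs agree
lemma mem_row_grid (nn : Nat) (vs : List Int) (hv : vs.length ≤ nn * nn)
    (r : Nat) (hr : r < nn) (x : Int) (hx : 1 ≤ x) :
    x ∈ (gridOf nn vs).getD r [] ↔ ∃ i < vs.length, i / nn = r ∧ aval vs i = x := by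
  rw [List.mem_iff_getElem]
  constructor
  · rintro ⟨c', hc', hval⟩
    rw [length_row_gridOf nn vs r hr] at hc'
    have he := entry_gridOf nn vs hv r c' hr hc'
    rw [List.getD_eq_getElem _ _ (by rw [length_row_gridOf nn vs r hr]; exact hc'), hval] at he
    by_cases hin : r * nn + c' < vs.length
    · rw [if_pos hin] at he
      exact ⟨r * nn + c', hin,
        ((coord_eq_iff nn r c' (r * nn + c') hr hc').2 rfl).1, he.symm⟩
    · rw [if_neg hin] at he; omega
  · rintro ⟨i, hi, hir, hval⟩
    have hilt : i < nn * nn := lt_of_lt_of_le hi hv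
    obtain ⟨hr', hc'⟩ := cell_coords nn i hilt
    refine ⟨i % nn, by rw [length_row_gridOf nn vs r hr]; exact hc', ?_⟩
    have hidx : r * nn + i % nn = i := by
      have h2 := (coord_eq_iff nn (i / nn) (i % nn) i hr' hc').1 ⟨rfl, rfl⟩
      rw [← hir]; exact h2
    have he := entry_gridOf nn vs hv r (i % nn) hr hc'
    rw [hidx, if_pos hi, hval] at he
    rw [← List.getD_eq_getElem _ _ (by rw [length_row_gridOf nn vs r hr]; exact hc')]
    exact he
lemma col_any_grid (nn : Nat) (vs : List Int) (hv : vs.length ≤ nn * nn)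
    (c : Nat) (hc : c < nn) (x : Int) (hx : 1 ≤ x) :
    ((PySem.List.pyRange 0 (nn : Int) 1).any
        (fun i => (PySem.List.pyGetD (gridOf nn vs) i []).getD c 0 == x)) = true ↔
      ∃ i < vs.length, i % nn = c ∧ aval vs i = x := by
  rw [List.any_eq_true]
  constructor
  · rintro ⟨z, hz, hval⟩
    rw [PySem.List.mem_pyRange_one] at hz
    obtain ⟨hz0, hzn⟩ := hz
    have hzz : z = ((z.toNat : Nat) : Int) := (Int.toNat_of_nonneg hz0).symm
    rw [hzz, PySem.List.pyGetD_natCast, beq_iff_eq] at hval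
    have hrn : z.toNat < nn := by omega
    have he := entry_gridOf nn vs hv z.toNat c hrn hc
    rw [hval] at he
    by_cases hin : z.toNat * nn + c < vs.length
    · rw [if_pos hin] at he
      exact ⟨z.toNat * nn + c, hin,
        ((coord_eq_iff nn z.toNat c (z.toNat * nn + c) hrn hc).2 rfl).2, he.symm⟩
    · rw [if_neg hin] at he; omega
  · rintro ⟨i, hi, hic, hval⟩
    have hilt : i < nn * nn := lt_of_lt_of_le hi hv
    obtain ⟨hr', hc'⟩ := cell_coords nn i hilt
    refine ⟨((i / nn : Nat) : Int), by rw [PySem.List.mem_pyRange_one]; constructor <;> [positivity; exact_mod_cast hr'], ?_⟩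
    rw [PySem.List.pyGetD_natCast, beq_iff_eq]
    have hidx : (i / nn) * nn + c = i := by
      have h2 := (coord_eq_iff nn (i / nn) (i % nn) i hr' hc').1 ⟨rfl, rfl⟩
      rw [← hic]; exact h2
    have he := entry_gridOf nn vs hv (i / nn) c hr' hc
    rw [hidx, if_pos hi, hval] at he
    exact he
lemma check_eq (nn : Nat) (vs : List Int) (hv : vs.length ≤ nn * nn)
    (r c : Nat) (hr : r < nn) (hc : c < nn) (x : Int) (hx : 1 ≤ x) :
    (PySem.Set.contains ((rowsOf nn vs).getD r PySem.Set.empty) x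
      || PySem.Set.contains ((colsOf nn vs).getD c PySem.Set.empty) x) =
    ((PySem.List.pyGetD (gridOf nn vs) (r : Int) []).contains x
      || (PySem.List.pyRange 0 (nn : Int) 1).any
           (fun i => PySem.List.pyGetD (PySem.List.pyGetD (gridOf nn vs) i []) (c : Int) 0 == x)) := by
  rw [Bool.eq_iff_iff]
  simp only [Bool.or_eq_true, PySem.Set.contains_iff, PySem.List.pyGetD_natCast,
    List.contains_iff_mem]
  rw [mem_rowsOf nn vs hv r hr x, mem_colsOf nn vs hv c hc x,
    mem_row_grid nn vs hv r hr x hx, col_any_grid nn vs hv c hc x hx]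

-- abbreviations for the Int-level coordinates the ports compute
lemma coordR_cast (nn k : Nat) : PySem.Int.floordiv (k : Int) (nn : Int) = ((k / nn : Nat) : Int) :=
  PySem.Int.floordiv_natCast k nn

lemma coordC_cast (nn k : Nat) : PySem.Int.mod (k : Int) (nn : Int) = ((k % nn : Nat) : Int) :=
  PySem.Int.mod_natCast k nn

lemma remove?_add_of_not_mem (s : PySem.Set Int) (x : Int) (hx : x ∉ s) :
    PySem.Set.remove? (PySem.Set.add s x) x = some s := by
  have hc : PySem.Set.contains (PySem.Set.add s x) x = true := by
    rw [PySem.Set.contains_iff, PySem.Set.mem_add]; exact Or.inr rfl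
  rw [PySem.Set.remove?, if_pos hc, PySem.Set.add_of_not_mem hx]
  have : PySem.Set.discard (s ++ [x]) x = s := by
    rw [PySem.Set.discard, List.filter_append]
    have h1 : List.filter (fun y => !y == x) s = s :=
      List.filter_eq_self.2 (fun y hy => by simp; exact fun h => hx (h ▸ hy))
    have h2 : List.filter (fun y => !y == x) [x] = [] := by simp
    rw [h1, h2, List.append_nil]
  rw [this]

-- placing `num` at the next cell: A's state update is exactly `stAOf nn (num :: vs)`
lemma place_bridge (nn : Nat) (vs : List Int) (num : Int) :
    ((PySem.List.pySetD (gridOf nn vs) (PySem.Int.floordiv (vs.length : Int) (nn : Int))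
        (PySem.List.pySetD
          (PySem.List.pyGetD (gridOf nn vs) (PySem.Int.floordiv (vs.length : Int) (nn : Int)) [])
          (PySem.Int.mod (vs.length : Int) (nn : Int)) num),
      PySem.List.pySetD (rowsOf nn vs) (PySem.Int.floordiv (vs.length : Int) (nn : Int))
        (PySem.Set.add
          (PySem.List.pyGetD (rowsOf nn vs) (PySem.Int.floordiv (vs.length : Int) (nn : Int))
            PySem.Set.empty) num),
      PySem.List.pySetD (colsOf nn vs) (PySem.Int.mod (vs.length : Int) (nn : Int))
        (PySem.Set.add
          (PySem.List.pyGetD (colsOf nn vs) (PySem.Int.mod (vs.length : Int) (nn : Int))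
            PySem.Set.empty) num)) : StA) = stAOf nn (num :: vs) := by
  rw [coordR_cast, coordC_cast]
  simp only [PySem.List.pySetD_natCast, PySem.List.pyGetD_natCast]
  rfl

-- undoing that placement restores `stAOf nn vs`
lemma unplace_bridge (nn : Nat) (vs : List Int) (hv : vs.length < nn * nn) (num : Int)
    (_hnum : 1 ≤ num)
    (hrow : num ∉ (rowsOf nn vs).getD (vs.length / nn) PySem.Set.empty)
    (hcol : num ∉ (colsOf nn vs).getD (vs.length % nn) PySem.Set.empty) :
    ((PySem.List.pySetD (gridOf nn (num :: vs)) (PySem.Int.floordiv (vs.length : Int) (nn : Int))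
        (PySem.List.pySetD
          (PySem.List.pyGetD (gridOf nn (num :: vs)) (PySem.Int.floordiv (vs.length : Int) (nn : Int)) [])
          (PySem.Int.mod (vs.length : Int) (nn : Int)) 0),
      PySem.List.pySetD (rowsOf nn (num :: vs)) (PySem.Int.floordiv (vs.length : Int) (nn : Int))
        ((PySem.Set.remove?
            (PySem.List.pyGetD (rowsOf nn (num :: vs)) (PySem.Int.floordiv (vs.length : Int) (nn : Int))
              PySem.Set.empty) num).getD
          (PySem.List.pyGetD (rowsOf nn (num :: vs)) (PySem.Int.floordiv (vs.length : Int) (nn : Int))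
            PySem.Set.empty)),
      PySem.List.pySetD (colsOf nn (num :: vs)) (PySem.Int.mod (vs.length : Int) (nn : Int))
        ((PySem.Set.remove?
            (PySem.List.pyGetD (colsOf nn (num :: vs)) (PySem.Int.mod (vs.length : Int) (nn : Int))
              PySem.Set.empty) num).getD
          (PySem.List.pyGetD (colsOf nn (num :: vs)) (PySem.Int.mod (vs.length : Int) (nn : Int))
            PySem.Set.empty))) : StA) = stAOf nn vs := by
  obtain ⟨hr0, hc0⟩ := cell_coords nn vs.length hv
  rw [coordR_cast, coordC_cast]
  simp only [PySem.List.pySetD_natCast, PySem.List.pyGetD_natCast]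
  have hglen : (gridOf nn vs).length = nn := length_gridOf nn vs
  have hrowlen : ((gridOf nn vs).getD (vs.length / nn) []).length = nn :=
    length_row_gridOf nn vs _ hr0
  have hgrow : (gridOf nn (num :: vs)).getD (vs.length / nn) [] =
      ((gridOf nn vs).getD (vs.length / nn) []).set (vs.length % nn) num := by
    rw [gridOf, setCellN, getD_set_list, if_pos ⟨rfl, by omega⟩]
  have hcell0 : ((gridOf nn vs).getD (vs.length / nn) []).getD (vs.length % nn) 0 = 0 := by
    rw [entry_gridOf nn vs (le_of_lt hv) _ _ hr0 hc0, if_neg]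
    have := (coord_eq_iff nn (vs.length / nn) (vs.length % nn) vs.length hr0 hc0).1 ⟨rfl, rfl⟩
    omega
  have hgridpart : (gridOf nn (num :: vs)).set (vs.length / nn)
      (((gridOf nn (num :: vs)).getD (vs.length / nn) []).set (vs.length % nn) 0) = gridOf nn vs := by
    rw [hgrow, List.set_set]
    show (gridOf nn (num :: vs)).set (vs.length / nn) _ = _
    rw [gridOf, setCellN, List.set_set]
    have h0 : ((gridOf nn vs).getD (vs.length / nn) []).set (vs.length % nn) 0 =
        (gridOf nn vs).getD (vs.length / nn) [] := by
      have hc' : ((gridOf nn vs).getD (vs.length / nn) [])[vs.length % nn]'(by omega) = 0 := by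
        rw [← List.getD_eq_getElem _ 0 (by omega)]; exact hcell0
      rw [← hc']
      exact List.set_getElem_self ..
    rw [h0]
    rw [show (gridOf nn vs).getD (vs.length / nn) [] = (gridOf nn vs)[vs.length / nn] from
      List.getD_eq_getElem _ _ (by omega)]
    exact List.set_getElem_self ..
  have hrowspart : (rowsOf nn (num :: vs)).set (vs.length / nn)
      ((PySem.Set.remove? ((rowsOf nn (num :: vs)).getD (vs.length / nn) PySem.Set.empty) num).getD
        ((rowsOf nn (num :: vs)).getD (vs.length / nn) PySem.Set.empty)) = rowsOf nn vs := by
    have hlen : (rowsOf nn vs).length = nn := length_rowsOf nn vs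
    have hget : (rowsOf nn (num :: vs)).getD (vs.length / nn) PySem.Set.empty =
        PySem.Set.add ((rowsOf nn vs).getD (vs.length / nn) PySem.Set.empty) num := by
      rw [rowsOf, getD_set_list, if_pos ⟨rfl, by omega⟩]
    rw [hget, remove?_add_of_not_mem _ _ hrow]
    show (rowsOf nn (num :: vs)).set (vs.length / nn)
        ((rowsOf nn vs).getD (vs.length / nn) PySem.Set.empty) = rowsOf nn vs
    rw [rowsOf, List.set_set,
      show (rowsOf nn vs).getD (vs.length / nn) PySem.Set.empty = (rowsOf nn vs)[vs.length / nn] from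
        List.getD_eq_getElem _ _ (by omega)]
    exact List.set_getElem_self ..
  have hcolspart : (colsOf nn (num :: vs)).set (vs.length % nn)
      ((PySem.Set.remove? ((colsOf nn (num :: vs)).getD (vs.length % nn) PySem.Set.empty) num).getD
        ((colsOf nn (num :: vs)).getD (vs.length % nn) PySem.Set.empty)) = colsOf nn vs := by
    have hlen : (colsOf nn vs).length = nn := length_colsOf nn vs
    have hget : (colsOf nn (num :: vs)).getD (vs.length % nn) PySem.Set.empty =
        PySem.Set.add ((colsOf nn vs).getD (vs.length % nn) PySem.Set.empty) num := by
      rw [colsOf, getD_set_list, if_pos ⟨rfl, by omega⟩]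
    rw [hget, remove?_add_of_not_mem _ _ hcol]
    show (colsOf nn (num :: vs)).set (vs.length % nn)
        ((colsOf nn vs).getD (vs.length % nn) PySem.Set.empty) = colsOf nn vs
    rw [colsOf, List.set_set,
      show (colsOf nn vs).getD (vs.length % nn) PySem.Set.empty = (colsOf nn vs)[vs.length % nn] from
        List.getD_eq_getElem _ _ (by omega)]
    exact List.set_getElem_self ..
  show (_, _, _) = stAOf nn vs
  rw [stAOf]
  exact Prod.ext (by exact hgridpart) (Prod.ext (by exact hrowspart) (by exact hcolspart))

-- on failure, A's depth-limited search hands back exactly the state it was given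
lemma loopRestore (nn : Nat) (_hnn : 1 ≤ nn) (f : Nat)
    (hd : ∀ ws : List Int, InvV nn ws → ∀ out,
      dlsA f (stAOf nn ws) (ws.length : Int) ((nn : Int) * nn) (nn : Int) = (false, out) →
      out = stAOf nn ws) :
    ∀ k : Nat, ∀ start : Int, ∀ ws : List Int, k = ((nn : Int) + 1 - start).toNat →
      InvV nn ws → ws.length < nn * nn → 1 ≤ start → ∀ out,
      loopA f (PySem.List.pyRange start ((nn : Int) + 1) 1) (stAOf nn ws)
        (PySem.Int.floordiv (ws.length : Int) (nn : Int)) (PySem.Int.mod (ws.length : Int) (nn : Int))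
        (ws.length : Int) ((nn : Int) * nn) (nn : Int) = (false, out) →
      out = stAOf nn ws := by
  intro k
  induction k using Nat.strong_induction_on with
  | _ k ihk =>
    intro start ws hk hw hlen hs out h
    by_cases hsn : start ≤ (nn : Int)
    · rw [PySem.List.pyRange_one_cons (by omega), loopA] at h
      simp only [stAOf] at h
      set g := !PySem.Set.contains
            (PySem.List.pyGetD (rowsOf nn ws) (PySem.Int.floordiv (ws.length : Int) (nn : Int))
              PySem.Set.empty) start &&
          !PySem.Set.contains
            (PySem.List.pyGetD (colsOf nn ws) (PySem.Int.mod (ws.length : Int) (nn : Int))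
              PySem.Set.empty) start with hgdef
      by_cases hg : g = true
      · rw [if_pos hg] at h
        have hw' : InvV nn (start :: ws) := by
          refine ⟨by simp only [List.length_cons]; omega, ?_⟩
          intro v hv
          rcases List.mem_cons.1 hv with h' | h'
          · subst h'; exact ⟨hs, hsn⟩
          · exact hw.2 v h'
        have hb := place_bridge nn ws start
        rw [show ((ws.length : Int) + 1) = (((ws.length + 1 : Nat)) : Int) by push_cast; ring] at h
        rw [show (((ws.length + 1 : Nat)) : Int) = ((start :: ws).length : Int) by simp] at h
        rcases hdls : dlsA f (stAOf nn (start :: ws)) ((start :: ws).length : Int)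
            ((nn : Int) * nn) (nn : Int) with ⟨b, st2⟩
        rw [hb, hdls] at h
        cases b
        · -- recursive call failed: state restored, loop continues
          have hst2 : st2 = stAOf nn (start :: ws) := hd (start :: ws) hw' st2 hdls
          subst hst2
          dsimp only at h
          simp only [stAOf] at h
          -- the undo writes rebuild stAOf nn ws
          have hnotrow : start ∉ (rowsOf nn ws).getD (ws.length / nn) PySem.Set.empty := by
            have := hgdef
            intro hmem
            have hcontains : PySem.Set.contains
                (PySem.List.pyGetD (rowsOf nn ws) (PySem.Int.floordiv (ws.length : Int) (nn : Int))
                  PySem.Set.empty) start = true := by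
              rw [coordR_cast, PySem.List.pyGetD_natCast, PySem.Set.contains_iff]
              exact hmem
            rw [hcontains] at hgdef
            simp at hgdef
            rw [hgdef] at hg
            simp at hg
          have hnotcol : start ∉ (colsOf nn ws).getD (ws.length % nn) PySem.Set.empty := by
            intro hmem
            have hcontains : PySem.Set.contains
                (PySem.List.pyGetD (colsOf nn ws) (PySem.Int.mod (ws.length : Int) (nn : Int))
                  PySem.Set.empty) start = true := by
              rw [coordC_cast, PySem.List.pyGetD_natCast, PySem.Set.contains_iff]
              exact hmem
            rw [hcontains] at hgdef
            simp at hgdef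
            rw [hgdef] at hg
            simp at hg
          have hub := unplace_bridge nn ws hlen start hs hnotrow hnotcol
          simp only [stAOf] at hub
          rw [hub] at h
          have happ := ihk (((nn : Int) + 1 - (start + 1)).toNat) (by omega) (start + 1) ws rfl
            hw hlen (by omega) out
          simp only [stAOf] at happ
          exact happ h
        · exfalso
          dsimp only at h
          exact absurd h (by simp)
      · rw [if_neg hg] at h
        have happ := ihk (((nn : Int) + 1 - (start + 1)).toNat) (by omega) (start + 1) ws rfl
          hw hlen (by omega) out
        simp only [stAOf] at happ
        exact happ h
    · rw [PySem.List.pyRange_one_eq_nil (by omega), loopA] at h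
      injection h with h1 h2
      exact h2.symm

lemma dlsRestore (nn : Nat) (_hnn : 1 ≤ nn) :
    ∀ f : Nat, ∀ ws : List Int, InvV nn ws → ∀ out,
      dlsA f (stAOf nn ws) (ws.length : Int) ((nn : Int) * nn) (nn : Int) = (false, out) →
      out = stAOf nn ws := by
  intro f
  induction f with
  | zero =>
    intro ws hw out h
    rw [dlsA] at h
    split_ifs at h <;> simp_all
  | succ f ih =>
    intro ws hw out h
    rw [dlsA] at h
    by_cases h1 : (ws.length : Int) = (nn : Int) * nn
    · rw [if_pos h1] at h; simp at h
    · rw [if_neg h1] at h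
      by_cases h2 : (ws.length : Int) ≥ (nn : Int) * nn
      · rw [if_pos h2] at h
        injection h with h1 h2'
        exact h2'.symm
      · rw [if_neg h2] at h
        have hcast : ((nn * nn : Nat) : Int) = (nn : Int) * nn := by push_cast; ring
        have hlen : ws.length < nn * nn := by omega
        exact loopRestore nn _hnn f ih (((nn : Int) + 1 - 1).toNat) 1 ws rfl hw hlen
          (by omega) out h

-- the fuel is irrelevant once it is at least the remaining depth
lemma fuelIrr (nn : Nat) (_hnn : 1 ≤ nn) :
    ∀ f : Nat,
      (∀ g : Nat, ∀ st : StA, ∀ ci : Int,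
        (((nn : Int) * nn - ci).toNat ≤ f) → (((nn : Int) * nn - ci).toNat ≤ g) →
        dlsA f st ci ((nn : Int) * nn) (nn : Int) = dlsA g st ci ((nn : Int) * nn) (nn : Int)) ∧
      (∀ g : Nat, ∀ lst : List Int, ∀ st : StA, ∀ row col ci : Int,
        (((nn : Int) * nn - ci - 1).toNat ≤ f) → (((nn : Int) * nn - ci - 1).toNat ≤ g) →
        loopA f lst st row col ci ((nn : Int) * nn) (nn : Int) =
          loopA g lst st row col ci ((nn : Int) * nn) (nn : Int)) := by
  intro f
  induction f with
  | zero =>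
    have qd : ∀ g : Nat, ∀ st : StA, ∀ ci : Int,
        (((nn : Int) * nn - ci).toNat ≤ 0) → (((nn : Int) * nn - ci).toNat ≤ g) →
        dlsA 0 st ci ((nn : Int) * nn) (nn : Int) = dlsA g st ci ((nn : Int) * nn) (nn : Int) := by
      intro g st ci h0 hg
      rw [dlsA, dlsA]
      split_ifs with h1 h2
      · rfl
      · rfl
      · exact absurd h0 (by omega)
    refine ⟨qd, ?_⟩
    intro g lst st row col ci h0 hg
    induction lst generalizing st with
    | nil => rw [loopA, loopA]
    | cons num rest ih =>
      rw [loopA, loopA]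
      by_cases hgrd : (!PySem.Set.contains (PySem.List.pyGetD st.2.1 row PySem.Set.empty) num &&
          !PySem.Set.contains (PySem.List.pyGetD st.2.2 col PySem.Set.empty) num) = true
      · rw [if_pos hgrd, if_pos hgrd]
        dsimp only
        have hd := qd g ((PySem.List.pySetD st.1 row (PySem.List.pySetD (PySem.List.pyGetD st.1 row []) col num),
            PySem.List.pySetD st.2.1 row (PySem.Set.add (PySem.List.pyGetD st.2.1 row PySem.Set.empty) num),
            PySem.List.pySetD st.2.2 col (PySem.Set.add (PySem.List.pyGetD st.2.2 col PySem.Set.empty) num))) (ci + 1) (by omega) (by omega)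
        rw [← hd]
        rcases hdls : dlsA 0 ((PySem.List.pySetD st.1 row (PySem.List.pySetD (PySem.List.pyGetD st.1 row []) col num),
            PySem.List.pySetD st.2.1 row (PySem.Set.add (PySem.List.pyGetD st.2.1 row PySem.Set.empty) num),
            PySem.List.pySetD st.2.2 col (PySem.Set.add (PySem.List.pyGetD st.2.2 col PySem.Set.empty) num))) (ci + 1) ((nn : Int) * nn) (nn : Int) with ⟨b, st2⟩
        cases b
        · dsimp only
          exact ih _
        · rfl
      · rw [if_neg hgrd, if_neg hgrd]
        exact ih _
  | succ f ihf =>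
    have qd : ∀ g : Nat, ∀ st : StA, ∀ ci : Int,
        (((nn : Int) * nn - ci).toNat ≤ f + 1) → (((nn : Int) * nn - ci).toNat ≤ g) →
        dlsA (f + 1) st ci ((nn : Int) * nn) (nn : Int) =
          dlsA g st ci ((nn : Int) * nn) (nn : Int) := by
      intro g st ci hf hg
      rw [dlsA, dlsA]
      split_ifs with h1 h2
      · rfl
      · rfl
      · obtain ⟨g', rfl⟩ : ∃ g', g = g' + 1 := ⟨g - 1, by omega⟩
        dsimp only
        exact ihf.2 g' _ st _ _ ci (by omega) (by omega)
    refine ⟨qd, ?_⟩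
    intro g lst st row col ci h0 hg
    induction lst generalizing st with
    | nil => rw [loopA, loopA]
    | cons num rest ih =>
      rw [loopA, loopA]
      by_cases hgrd : (!PySem.Set.contains (PySem.List.pyGetD st.2.1 row PySem.Set.empty) num &&
          !PySem.Set.contains (PySem.List.pyGetD st.2.2 col PySem.Set.empty) num) = true
      · rw [if_pos hgrd, if_pos hgrd]
        dsimp only
        have hd := qd g ((PySem.List.pySetD st.1 row (PySem.List.pySetD (PySem.List.pyGetD st.1 row []) col num),
            PySem.List.pySetD st.2.1 row (PySem.Set.add (PySem.List.pyGetD st.2.1 row PySem.Set.empty) num),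
            PySem.List.pySetD st.2.2 col (PySem.Set.add (PySem.List.pyGetD st.2.2 col PySem.Set.empty) num))) (ci + 1) (by omega) (by omega)
        rw [← hd]
        rcases hdls : dlsA (f + 1) ((PySem.List.pySetD st.1 row (PySem.List.pySetD (PySem.List.pyGetD st.1 row []) col num),
            PySem.List.pySetD st.2.1 row (PySem.Set.add (PySem.List.pyGetD st.2.1 row PySem.Set.empty) num),
            PySem.List.pySetD st.2.2 col (PySem.Set.add (PySem.List.pyGetD st.2.2 col PySem.Set.empty) num))) (ci + 1) ((nn : Int) * nn) (nn : Int) with ⟨b, st2⟩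
        cases b
        · dsimp only
          exact ih _
        · rfl
      · rw [if_neg hgrd, if_neg hgrd]
        exact ih _

-- for depth limits below n*n the depth-limited search always fails
lemma dlsFail (nn : Nat) :
    ∀ f : Nat,
      (∀ st : StA, ∀ ci dl : Int, dl < (nn : Int) * nn → ci ≤ dl →
        (dlsA f st ci dl (nn : Int)).1 = false) ∧
      (∀ lst : List Int, ∀ st : StA, ∀ row col ci dl : Int, dl < (nn : Int) * nn → ci < dl →
        (loopA f lst st row col ci dl (nn : Int)).1 = false) := by
  intro f
  induction f with
  | zero =>
    have fd : ∀ st : StA, ∀ ci dl : Int, dl < (nn : Int) * nn → ci ≤ dl →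
        (dlsA 0 st ci dl (nn : Int)).1 = false := by
      intro st ci dl h1 h2
      rw [dlsA, if_neg (by omega)]
      by_cases h3 : ci ≥ dl
      · rw [if_pos h3]
      · rw [if_neg h3]
    refine ⟨fd, ?_⟩
    intro lst st row col ci dl h1 h2
    induction lst generalizing st with
    | nil => rw [loopA]
    | cons num rest ih =>
      rw [loopA]
      by_cases hgrd : (!PySem.Set.contains (PySem.List.pyGetD st.2.1 row PySem.Set.empty) num &&
          !PySem.Set.contains (PySem.List.pyGetD st.2.2 col PySem.Set.empty) num) = true
      · rw [if_pos hgrd]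
        dsimp only
        rcases hdls : dlsA 0 ((PySem.List.pySetD st.1 row (PySem.List.pySetD (PySem.List.pyGetD st.1 row []) col num),
            PySem.List.pySetD st.2.1 row (PySem.Set.add (PySem.List.pyGetD st.2.1 row PySem.Set.empty) num),
            PySem.List.pySetD st.2.2 col (PySem.Set.add (PySem.List.pyGetD st.2.2 col PySem.Set.empty) num))) (ci + 1) dl (nn : Int) with ⟨b, st2⟩
        cases b
        · dsimp only
          exact ih _
        · exfalso
          have hff := fd ((PySem.List.pySetD st.1 row (PySem.List.pySetD (PySem.List.pyGetD st.1 row []) col num),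
            PySem.List.pySetD st.2.1 row (PySem.Set.add (PySem.List.pyGetD st.2.1 row PySem.Set.empty) num),
            PySem.List.pySetD st.2.2 col (PySem.Set.add (PySem.List.pyGetD st.2.2 col PySem.Set.empty) num))) (ci + 1) dl h1 (by omega)
          rw [hdls] at hff
          simp at hff
      · rw [if_neg hgrd]
        exact ih _
  | succ f ihf =>
    have fd : ∀ st : StA, ∀ ci dl : Int, dl < (nn : Int) * nn → ci ≤ dl →
        (dlsA (f + 1) st ci dl (nn : Int)).1 = false := by
      intro st ci dl h1 h2
      rw [dlsA, if_neg (by omega)]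
      by_cases h3 : ci ≥ dl
      · rw [if_pos h3]
      · rw [if_neg h3]
        dsimp only
        exact ihf.2 _ st _ _ ci dl h1 (by omega)
    refine ⟨fd, ?_⟩
    intro lst st row col ci dl h1 h2
    induction lst generalizing st with
    | nil => rw [loopA]
    | cons num rest ih =>
      rw [loopA]
      by_cases hgrd : (!PySem.Set.contains (PySem.List.pyGetD st.2.1 row PySem.Set.empty) num &&
          !PySem.Set.contains (PySem.List.pyGetD st.2.2 col PySem.Set.empty) num) = true
      · rw [if_pos hgrd]
        dsimp only
        rcases hdls : dlsA (f + 1) ((PySem.List.pySetD st.1 row (PySem.List.pySetD (PySem.List.pyGetD st.1 row []) col num),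
            PySem.List.pySetD st.2.1 row (PySem.Set.add (PySem.List.pyGetD st.2.1 row PySem.Set.empty) num),
            PySem.List.pySetD st.2.2 col (PySem.Set.add (PySem.List.pyGetD st.2.2 col PySem.Set.empty) num))) (ci + 1) dl (nn : Int) with ⟨b, st2⟩
        cases b
        · dsimp only
          exact ih _
        · exfalso
          have hff := fd ((PySem.List.pySetD st.1 row (PySem.List.pySetD (PySem.List.pyGetD st.1 row []) col num),
            PySem.List.pySetD st.2.1 row (PySem.Set.add (PySem.List.pyGetD st.2.1 row PySem.Set.empty) num),
            PySem.List.pySetD st.2.2 col (PySem.Set.add (PySem.List.pyGetD st.2.2 col PySem.Set.empty) num))) (ci + 1) dl h1 (by omega)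
          rw [hdls] at hff
          simp at hff
      · rw [if_neg hgrd]
        exact ih _

-- B's candidate scan at the cell `vs.length`, as a function of the spec state
def nfB (nn : Nat) (vs : List Int) (start : Int) : Int :=
  nextFreeB (gridOf nn vs) (PySem.Int.floordiv (vs.length : Int) (nn : Int))
    (PySem.Int.mod (vs.length : Int) (nn : Int)) start (nn : Int)

-- clearing the just-written cell restores the previous grid (grid component of the undo)
lemma grid_pop (nn : Nat) (vs : List Int) (hv : vs.length < nn * nn) (num : Int) :
    PySem.List.pySetD (gridOf nn (num :: vs)) (PySem.Int.floordiv (vs.length : Int) (nn : Int))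
      (PySem.List.pySetD
        (PySem.List.pyGetD (gridOf nn (num :: vs)) (PySem.Int.floordiv (vs.length : Int) (nn : Int)) [])
        (PySem.Int.mod (vs.length : Int) (nn : Int)) 0) = gridOf nn vs := by
  obtain ⟨hr0, hc0⟩ := cell_coords nn vs.length hv
  rw [coordR_cast, coordC_cast]
  simp only [PySem.List.pySetD_natCast, PySem.List.pyGetD_natCast]
  have hglen : (gridOf nn vs).length = nn := length_gridOf nn vs
  have hrowlen : ((gridOf nn vs).getD (vs.length / nn) []).length = nn :=
    length_row_gridOf nn vs _ hr0
  have hgrow : (gridOf nn (num :: vs)).getD (vs.length / nn) [] =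
      ((gridOf nn vs).getD (vs.length / nn) []).set (vs.length % nn) num := by
    rw [gridOf, setCellN, getD_set_list, if_pos ⟨rfl, by omega⟩]
  have hcell0 : ((gridOf nn vs).getD (vs.length / nn) []).getD (vs.length % nn) 0 = 0 := by
    rw [entry_gridOf nn vs (le_of_lt hv) _ _ hr0 hc0, if_neg]
    have := (coord_eq_iff nn (vs.length / nn) (vs.length % nn) vs.length hr0 hc0).1 ⟨rfl, rfl⟩
    omega
  rw [hgrow, List.set_set]
  show (gridOf nn (num :: vs)).set (vs.length / nn) _ = _
  rw [gridOf, setCellN, List.set_set]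
  have h0 : ((gridOf nn vs).getD (vs.length / nn) []).set (vs.length % nn) 0 =
      (gridOf nn vs).getD (vs.length / nn) [] := by
    have hc' : ((gridOf nn vs).getD (vs.length / nn) [])[vs.length % nn]'(by omega) = 0 := by
      rw [← List.getD_eq_getElem _ 0 (by omega)]; exact hcell0
    rw [← hc']
    exact List.set_getElem_self ..
  rw [h0]
  rw [show (gridOf nn vs).getD (vs.length / nn) [] = (gridOf nn vs)[vs.length / nn] from
    List.getD_eq_getElem _ _ (by omega)]
  exact List.set_getElem_self ..

-- the value read back from the just-written cell is the value that was placed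
lemma read_top (nn : Nat) (vs : List Int) (hv : vs.length < nn * nn) (num : Int) :
    PySem.List.pyGetD
      (PySem.List.pyGetD (gridOf nn (num :: vs)) (PySem.Int.floordiv (vs.length : Int) (nn : Int)) [])
      (PySem.Int.mod (vs.length : Int) (nn : Int)) 0 = num := by
  obtain ⟨hr0, hc0⟩ := cell_coords nn vs.length hv
  rw [coordR_cast, coordC_cast]
  simp only [PySem.List.pyGetD_natCast]
  rw [entry_gridOf nn (num :: vs) (by simp only [List.length_cons]; omega) _ _ hr0 hc0]
  have hidx := (coord_eq_iff nn (vs.length / nn) (vs.length % nn) vs.length hr0 hc0).1 ⟨rfl, rfl⟩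
  rw [hidx, if_pos (by simp only [List.length_cons]; omega), aval_cons, if_pos rfl]

-- one full step of A's inner loop, in terms of B's candidate scan
lemma tryA_step (nn : Nat) (hnn : 1 ≤ nn) (vs : List Int) (hw : InvV nn vs)
    (hlen : vs.length < nn * nn) :
    ∀ k : Nat, ∀ start : Int, k = ((nn : Int) + 1 - start).toNat → 1 ≤ start →
      (start ≤ nfB nn vs start ∧ nfB nn vs start ≤ max start ((nn : Int) + 1)) ∧
      tryA nn start vs =
        (if nfB nn vs start ≤ (nn : Int) then
          match dlsA (nn * nn) (stAOf nn (nfB nn vs start :: vs))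
              ((nfB nn vs start :: vs).length : Int) ((nn : Int) * nn) (nn : Int) with
          | (true, st2) => (true, st2)
          | (false, _) => tryA nn (nfB nn vs start + 1) vs
        else (false, stAOf nn vs)) := by
  intro k
  induction k using Nat.strong_induction_on with
  | _ k ihk =>
  intro start hk hs
  obtain ⟨hr0, hc0⟩ := cell_coords nn vs.length hlen
  by_cases hsn : start ≤ (nn : Int)
  · -- candidate in range: test it
    by_cases hchk : ((PySem.List.pyGetD (gridOf nn vs)
          (PySem.Int.floordiv (vs.length : Int) (nn : Int)) []).contains start
        || (PySem.List.pyRange 0 (nn : Int) 1).any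
            (fun i => PySem.List.pyGetD (PySem.List.pyGetD (gridOf nn vs) i [])
              (PySem.Int.mod (vs.length : Int) (nn : Int)) 0 == start)) = true
    · -- `start` is used: both sides skip to start+1
      have hnf : nfB nn vs start = nfB nn vs (start + 1) := by
        rw [nfB, nextFreeB, dif_pos ⟨hsn, hchk⟩, nfB]
      have hAguard : (!PySem.Set.contains
            (PySem.List.pyGetD (rowsOf nn vs) (PySem.Int.floordiv (vs.length : Int) (nn : Int))
              PySem.Set.empty) start &&
          !PySem.Set.contains
            (PySem.List.pyGetD (colsOf nn vs) (PySem.Int.mod (vs.length : Int) (nn : Int))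
              PySem.Set.empty) start) = false := by
        rw [coordR_cast, coordC_cast, PySem.List.pyGetD_natCast, PySem.List.pyGetD_natCast]
        have hce := check_eq nn vs (le_of_lt hlen) _ _ hr0 hc0 start hs
        rw [coordR_cast, coordC_cast] at hchk
        rw [← hce] at hchk
        rcases hb1 : PySem.Set.contains ((rowsOf nn vs).getD (vs.length / nn) PySem.Set.empty) start with _ | _ <;>
          rcases hb2 : PySem.Set.contains ((colsOf nn vs).getD (vs.length % nn) PySem.Set.empty) start with _ | _ <;>
            simp_all
      have htry : tryA nn start vs = tryA nn (start + 1) vs := by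
        rw [tryA, PySem.List.pyRange_one_cons (by omega), loopA]
        simp only [stAOf] at hAguard ⊢
        rw [if_neg (by rw [hAguard]; exact Bool.false_ne_true)]
        rfl
      have hrec := ihk (((nn : Int) + 1 - (start + 1)).toNat) (by omega) (start + 1) rfl (by omega)
      obtain ⟨⟨hb1, hb2⟩, hrest⟩ := hrec
      refine ⟨⟨by omega, by rw [hnf]; omega⟩, ?_⟩
      rw [htry, hnf, hrest]
    · -- `start` is free: A places it, exactly like B
      have hnf : nfB nn vs start = start := by
        rw [nfB, nextFreeB, dif_neg (by rintro ⟨h1, h2⟩; exact hchk h2)]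
      have hAguard : (!PySem.Set.contains
            (PySem.List.pyGetD (rowsOf nn vs) (PySem.Int.floordiv (vs.length : Int) (nn : Int))
              PySem.Set.empty) start &&
          !PySem.Set.contains
            (PySem.List.pyGetD (colsOf nn vs) (PySem.Int.mod (vs.length : Int) (nn : Int))
              PySem.Set.empty) start) = true := by
        rw [coordR_cast, coordC_cast, PySem.List.pyGetD_natCast, PySem.List.pyGetD_natCast]
        have hce := check_eq nn vs (le_of_lt hlen) _ _ hr0 hc0 start hs
        rw [coordR_cast, coordC_cast] at hchk
        rw [← hce] at hchk
        rcases hb1 : PySem.Set.contains ((rowsOf nn vs).getD (vs.length / nn) PySem.Set.empty) start with _ | _ <;>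
          rcases hb2 : PySem.Set.contains ((colsOf nn vs).getD (vs.length % nn) PySem.Set.empty) start with _ | _ <;>
            simp_all
      refine ⟨⟨by omega, by omega⟩, ?_⟩
      rw [hnf, if_pos hsn]
      rw [tryA, PySem.List.pyRange_one_cons (by omega), loopA]
      simp only [stAOf] at hAguard ⊢
      rw [if_pos hAguard]
      have hb := place_bridge nn vs start
      simp only [stAOf] at hb
      rw [hb]
      rw [show ((vs.length : Int) + 1) = (((start :: vs).length : Nat) : Int) by simp]
      rcases hdls : dlsA (nn * nn) (gridOf nn (start :: vs), rowsOf nn (start :: vs),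
          colsOf nn (start :: vs)) (((start :: vs).length : Nat) : Int) ((nn : Int) * nn) (nn : Int)
        with ⟨b, st2⟩
      have hdls' : dlsA (nn * nn) (stAOf nn (start :: vs)) (((start :: vs).length : Nat) : Int)
          ((nn : Int) * nn) (nn : Int) = (b, st2) := hdls
      cases b
      · -- failed: undo restores the state, loop resumes at start+1
        dsimp only
        have hw' : InvV nn (start :: vs) := by
          refine ⟨by simp only [List.length_cons]; omega, ?_⟩
          intro v hv
          rcases List.mem_cons.1 hv with h' | h'
          · subst h'; exact ⟨hs, hsn⟩
          · exact hw.2 v h'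
        have hst2 : st2 = stAOf nn (start :: vs) := dlsRestore nn hnn (nn * nn) (start :: vs) hw' st2 hdls'
        subst hst2
        simp only [stAOf] at *
        have hnotrow : start ∉ (rowsOf nn vs).getD (vs.length / nn) PySem.Set.empty := by
          intro hmem
          have : PySem.Set.contains ((rowsOf nn vs).getD (vs.length / nn) PySem.Set.empty) start = true :=
            PySem.Set.contains_iff _ _ |>.2 hmem
          rw [coordR_cast, coordC_cast, PySem.List.pyGetD_natCast, PySem.List.pyGetD_natCast, this] at hAguard
          simp at hAguard
        have hnotcol : start ∉ (colsOf nn vs).getD (vs.length % nn) PySem.Set.empty := by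
          intro hmem
          have : PySem.Set.contains ((colsOf nn vs).getD (vs.length % nn) PySem.Set.empty) start = true :=
            PySem.Set.contains_iff _ _ |>.2 hmem
          rw [coordR_cast, coordC_cast, PySem.List.pyGetD_natCast, PySem.List.pyGetD_natCast, this] at hAguard
          simp at hAguard
        have hub := unplace_bridge nn vs hlen start hs hnotrow hnotcol
        simp only [stAOf] at hub
        rw [hub]
        rw [tryA]
        simp only [stAOf]
      · rfl
  · -- no candidate in range: the scan stops and A's loop is empty
    have hnf : nfB nn vs start = start := by
      rw [nfB, nextFreeB, dif_neg (by rintro ⟨h1, h2⟩; exact hsn h1)]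
    refine ⟨⟨by omega, by rw [hnf]; exact le_max_left _ _⟩, ?_⟩
    rw [hnf, if_neg hsn]
    rw [tryA, PySem.List.pyRange_one_eq_nil (by omega), loopA]

-- ===== the search-progress measure: every loop step of B strictly increases mCfg =====
lemma mStk_bound (nn : Nat) (vs : List Int) (hw : InvV nn vs) :
    mStk nn vs + (nn + 2) ^ (nn * nn - vs.length + 1) ≤ (nn + 2) ^ (nn * nn + 1) := by
  obtain ⟨hlen, hvals⟩ := hw
  induction vs with
  | nil => simp [mStk]
  | cons v vs ih =>
    simp only [List.length_cons] at hlen ⊢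
    have hv : v.toNat ≤ nn := by
      have := hvals v (List.mem_cons_self ..)
      omega
    have he : nn * nn - (vs.length + 1) + 1 = nn * nn - vs.length := by omega
    rw [he, mStk]
    have ih' := ih (by omega) (fun w hw => hvals w (List.mem_cons_of_mem _ hw))
    have hpow : (nn + 2) ^ (nn * nn - vs.length + 1) =
        (nn + 2) ^ (nn * nn - vs.length) * (nn + 2) := pow_succ _ _
    have h1 : v.toNat * (nn + 2) ^ (nn * nn - vs.length) + (nn + 2) ^ (nn * nn - vs.length) ≤
        (nn + 2) ^ (nn * nn - vs.length + 1) := by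
      rw [hpow]
      calc v.toNat * (nn + 2) ^ (nn * nn - vs.length) + (nn + 2) ^ (nn * nn - vs.length)
          = (v.toNat + 1) * (nn + 2) ^ (nn * nn - vs.length) := by ring
        _ ≤ (nn + 2) * (nn + 2) ^ (nn * nn - vs.length) := Nat.mul_le_mul_right _ (by omega)
        _ = (nn + 2) ^ (nn * nn - vs.length) * (nn + 2) := Nat.mul_comm _ _
    linarith [ih']

lemma mCfg_lt (nn : Nat) (vs : List Int) (start : Int) (hw : InvV nn vs)
    (hstart : 0 ≤ start ∧ start ≤ (nn : Int) + 1) :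
    mCfg nn vs start < (nn + 2) ^ (nn * nn + 1) := by
  have hb := mStk_bound nn vs hw
  have hs : start.toNat ≤ nn + 1 := by omega
  have hX : 1 ≤ (nn + 2) ^ (nn * nn - vs.length) := Nat.one_le_pow _ _ (by omega)
  have hpow : (nn + 2) ^ (nn * nn - vs.length + 1) =
      (nn + 2) ^ (nn * nn - vs.length) * (nn + 2) := pow_succ _ _
  rw [mCfg]
  nlinarith [hb, hs, hX, hpow]

lemma m_push (nn : Nat) (vs : List Int) (start num : Int)
    (hs : 1 ≤ start) (h : start ≤ num) :
    mCfg nn vs start + 1 ≤ mCfg nn (num :: vs) 1 := by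
  have h1 : start.toNat * (nn + 2) ^ (nn * nn - vs.length) ≤
      num.toNat * (nn + 2) ^ (nn * nn - vs.length) :=
    Nat.mul_le_mul_right _ (by omega)
  have h2 : 1 ≤ (nn + 2) ^ (nn * nn - (vs.length + 1)) := Nat.one_le_pow _ _ (by omega)
  simp only [mCfg, mStk, List.length_cons, Int.toNat_one, one_mul]
  linarith [h1, h2]

lemma m_pop (nn : Nat) (v : Int) (vs : List Int) (start : Int)
    (hv : 1 ≤ v) (hs2 : start ≤ (nn : Int) + 1) (hlen : vs.length < nn * nn) :
    mCfg nn (v :: vs) start + 1 ≤ mCfg nn vs (v + 1) := by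
  have he : nn * nn - (vs.length + 1) + 1 = nn * nn - vs.length := by omega
  have hY : 1 ≤ (nn + 2) ^ (nn * nn - (vs.length + 1)) := Nat.one_le_pow _ _ (by omega)
  have hpow : (nn + 2) ^ (nn * nn - vs.length) =
      (nn + 2) ^ (nn * nn - (vs.length + 1)) * (nn + 2) := by
    rw [← pow_succ, he]
  have hsn : start.toNat ≤ nn + 1 := by omega
  have hv1 : (v + 1).toNat = v.toNat + 1 := by omega
  simp only [mCfg, mStk, List.length_cons, hv1]
  nlinarith [hY, hpow, hsn]

-- ===== the main simulation: B's iterative loop computes A's full-depth search =====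
lemma mainB (nn : Nat) (hnn : 1 ≤ nn) :
    ∀ fuel : Nat, ∀ vs : List Int, ∀ start : Int,
      InvV nn vs → 1 ≤ start → start ≤ (nn : Int) + 1 →
      (nn + 2) ^ (nn * nn + 1) ≤ fuel + mCfg nn vs start →
      loopB fuel (gridOf nn vs) (vs.length : Int) start ((nn : Int) * nn) (nn : Int) =
        ASide nn vs start := by
  intro fuel
  induction fuel with
  | zero =>
    intro vs start hw hs1 hs2 hfuel
    exact absurd hfuel (by simpa using mCfg_lt nn vs start hw ⟨by omega, hs2⟩)
  | succ fuel ih =>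
    intro vs start hw hs1 hs2 hfuel
    rw [loopB]
    by_cases hci : (vs.length : Int) = (nn : Int) * nn
    · rw [if_pos hci]
      have hciN : vs.length = nn * nn := by exact_mod_cast hci
      rw [ASide, if_pos hciN]
    · rw [if_neg hci]
      have hciN : ¬ vs.length = nn * nn := fun h => hci (by exact_mod_cast h)
      have hlen : vs.length < nn * nn := by
        have := hw.1; omega
      dsimp only
      rw [show nextFreeB (gridOf nn vs) (PySem.Int.floordiv (vs.length : Int) (nn : Int))
          (PySem.Int.mod (vs.length : Int) (nn : Int)) start (nn : Int) = nfB nn vs start from rfl]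
      obtain ⟨⟨hm1, hm2⟩, htry⟩ :=
        tryA_step nn hnn vs hw hlen (((nn : Int) + 1 - start).toNat) start rfl hs1
      by_cases hnum : nfB nn vs start ≤ (nn : Int)
      · -- push: place the candidate and recurse on the next cell
        rw [if_pos hnum]
        have hpb := congrArg Prod.fst (place_bridge nn vs (nfB nn vs start))
        simp only [stAOf] at hpb
        rw [hpb]
        rw [show ((vs.length : Int) + 1) = (((nfB nn vs start :: vs).length : Nat) : Int) by simp]
        have hw' : InvV nn (nfB nn vs start :: vs) := by
          refine ⟨by simp only [List.length_cons]; omega, ?_⟩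
          intro w hwmem
          rcases List.mem_cons.1 hwmem with h' | h'
          · subst h'; exact ⟨by omega, hnum⟩
          · exact hw.2 w h'
        have hrec := ih (nfB nn vs start :: vs) 1 hw' (by omega) (by omega)
          (by have := m_push nn vs start (nfB nn vs start) hs1 hm1; omega)
        rw [hrec]
        have hgoal : ASide nn vs start = ASide nn (nfB nn vs start :: vs) 1 := by
          rw [ASide, if_neg hciN, htry, if_pos hnum]
          by_cases hfull : (nfB nn vs start :: vs).length = nn * nn
          · rw [ASide, if_pos hfull]
            rw [dlsA, if_pos (by exact_mod_cast hfull)]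
            dsimp only
            simp [stAOf]
          · rw [ASide, if_neg hfull]
            have hfull' : ¬ (((nfB nn vs start :: vs).length : Nat) : Int) = (nn : Int) * nn :=
              fun h => hfull (by exact_mod_cast h)
            have hle' : (nfB nn vs start :: vs).length ≤ nn * nn := hw'.1
            have hcast : ((nn * nn : Nat) : Int) = (nn : Int) * nn := by push_cast; ring
            have hdl : dlsA (nn * nn) (stAOf nn (nfB nn vs start :: vs))
                (((nfB nn vs start :: vs).length : Nat) : Int) ((nn : Int) * nn) (nn : Int) =
                tryA nn 1 (nfB nn vs start :: vs) := by
              rw [dlsA, if_neg hfull', if_neg (by omega)]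
              obtain ⟨f', hf'⟩ : ∃ f', nn * nn = f' + 1 := ⟨nn * nn - 1, by omega⟩
              rw [hf']
              dsimp only
              rw [tryA]
              exact (fuelIrr nn hnn f').2 (nn * nn) _ _ _ _ _ (by omega) (by omega)
            rw [hdl]
            rcases h1 : tryA nn 1 (nfB nn vs start :: vs) with ⟨b1, st1⟩
            cases b1
            · dsimp only
              rw [unwind]
            · rfl
        rw [hgoal]
      · -- dead end: the scan found nothing; pop (or fail at the first cell)
        rw [if_neg hnum]
        have hAS : ASide nn vs start = unwind nn vs := by
          rw [ASide, if_neg hciN, htry, if_neg hnum]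
        rw [hAS]
        by_cases hci0 : (vs.length : Int) = 0
        · rw [if_pos hci0]
          have : vs = [] := List.eq_nil_of_length_eq_zero (by exact_mod_cast hci0)
          subst this
          rw [unwind]
        · rw [if_neg hci0]
          rcases vs with _ | ⟨v, vs'⟩
          · exact absurd (by simp) hci0
          · have hv1 : 1 ≤ v := (hw.2 v (List.mem_cons_self ..)).1
            have hvn : v ≤ (nn : Int) := (hw.2 v (List.mem_cons_self ..)).2
            have hlen' : vs'.length < nn * nn := by
              have := hw.1
              simp only [List.length_cons] at this
              omega
            have hw'' : InvV nn vs' :=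
              ⟨by omega, fun w hwmem => hw.2 w (List.mem_cons_of_mem _ hwmem)⟩
            have hcast : ((v :: vs').length : Int) - 1 = (vs'.length : Int) := by
              simp only [List.length_cons]; push_cast; ring
            rw [hcast]
            rw [read_top nn vs' hlen' v, grid_pop nn vs' hlen' v]
            have hrec := ih vs' (v + 1) hw'' (by omega) (by omega)
              (by have := m_pop nn v vs' start hv1 hs2 hlen'
                  omega)
            rw [hrec]
            rw [ASide, if_neg (by omega), unwind]

-- ===== assembling the outer loops =====
lemma map_const_pyRange {α : Type} (nn : Nat) (x : α) :
    (PySem.List.pyRange 0 (nn : Int) 1).map (fun _ => x) = List.replicate nn x := by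
  rw [List.eq_replicate_iff]
  constructor
  · rw [List.length_map, PySem.List.length_pyRange_one]; simp
  · intro b hb
    rcases List.mem_map.1 hb with ⟨z, _, hz⟩
    exact hz.symm

-- for negative n the grid is empty and every depth-limited search fails at once
lemma outer_none (n : Int) (hn : n < 0) :
    ∀ lst : List Int, (∀ dl ∈ lst, 1 ≤ dl) → outerA lst n = none := by
  intro lst
  induction lst with
  | nil => intro _; rw [outerA]
  | cons dl rest ih =>
    intro hmem
    have hdl : 1 ≤ dl := hmem dl (List.mem_cons_self ..)
    have hnn : 1 ≤ n * n := by nlinarith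
    rw [outerA]
    have hdls : dlsA (n * n).toNat (initStA n) 0 dl n = (false, initStA n) := by
      rw [dlsA, if_neg (by omega), if_neg (by omega)]
      obtain ⟨k, hk⟩ : ∃ k, (n * n).toNat = k + 1 := ⟨(n * n).toNat - 1, by omega⟩
      rw [hk]
      dsimp only
      rw [PySem.List.pyRange_one_eq_nil (by omega), loopA]
    rw [hdls]
    exact ih (fun d hd => hmem d (List.mem_cons_of_mem _ hd))

-- all depth limits below n*n fail, so A's answer is that of the full-depth pass
lemma outer_eq (nn : Nat) (_hnn : 1 ≤ nn) :
    ∀ k : Nat, ∀ a : Int, k = ((nn : Int) * nn - a).toNat → 1 ≤ a → a ≤ (nn : Int) * nn →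
      outerA (PySem.List.pyRange a ((nn : Int) * nn + 1) 1) (nn : Int) =
        (match dlsA (((nn : Int) * nn).toNat) (initStA (nn : Int)) 0 ((nn : Int) * nn) (nn : Int) with
          | (true, st) => some st.1
          | (false, _) => none) := by
  intro k
  induction k using Nat.strong_induction_on with
  | _ k ihk =>
  intro a hk ha1 ha2
  rw [PySem.List.pyRange_one_cons (by omega), outerA]
  by_cases hlast : a = (nn : Int) * nn
  · subst hlast
    rcases hd : dlsA (((nn : Int) * nn).toNat) (initStA (nn : Int)) 0 ((nn : Int) * nn) (nn : Int)
      with ⟨b, st⟩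
    cases b
    · dsimp only
      rw [PySem.List.pyRange_one_eq_nil (by omega), outerA]
    · rfl
  · have hlt : a < (nn : Int) * nn := by omega
    rcases hd : dlsA (((nn : Int) * nn).toNat) (initStA (nn : Int)) 0 a (nn : Int) with ⟨b, st⟩
    have hfail := (dlsFail nn (((nn : Int) * nn).toNat)).1 (initStA (nn : Int)) 0 a hlt (by omega)
    rw [hd] at hfail
    cases b
    · dsimp only
      exact ihk (((nn : Int) * nn - (a + 1)).toNat) (by omega) (a + 1) rfl (by omega) (by omega)
    · simp at hfail

-- the full-depth search from the empty grid is A's inner loop from candidate 1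
lemma dls_top (nn : Nat) (hnn : 1 ≤ nn) :
    dlsA (nn * nn) (stAOf nn []) 0 ((nn : Int) * nn) (nn : Int) = tryA nn 1 [] := by
  have hcast : ((nn * nn : Nat) : Int) = (nn : Int) * nn := by push_cast; ring
  have ht : 1 ≤ nn * nn := by have := Nat.mul_le_mul hnn hnn; omega
  rw [dlsA, if_neg (by omega), if_neg (by omega)]
  obtain ⟨f', hf'⟩ : ∃ f', nn * nn = f' + 1 := ⟨nn * nn - 1, by omega⟩
  rw [hf']
  dsimp only
  rw [tryA]
  have h0 : ((List.length ([] : List Int) : Nat) : Int) = 0 := by simp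
  rw [h0]
  exact (fuelIrr nn hnn f').2 (nn * nn) _ _ _ _ _ (by omega) (by omega)

lemma initStA_eq (nn : Nat) : initStA (nn : Int) = stAOf nn [] := by
  rw [initStA, stAOf, gridOf, rowsOf, colsOf]
  rw [show ((nn : Int)).toNat = nn by simp]
  rw [map_const_pyRange, map_const_pyRange]

-- ===== VERDICT (by name: the statement is the Claim_ definition above) =====
theorem iddfs_latin_square_spec : Claim_equal_iddfs_latin_square := by
  unfold Claim_equal_iddfs_latin_square
  intro n _hdom
  unfold Spec_iddfs_latin_square
  by_cases hn : n ≤ 0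
  · rw [iddfs_latin_square_alt, if_pos hn, iddfs_latin_square]
    rcases lt_or_eq_of_le hn with hlt | heq
    · exact outer_none n hlt _ (fun dl hdl => (PySem.List.mem_pyRange_one.1 hdl).1)
    · subst heq
      rw [PySem.List.pyRange_one_eq_nil (by norm_num), outerA]
  · have hn1 : (1 : Int) ≤ n := by omega
    obtain ⟨nn, rfl⟩ : ∃ nn : Nat, n = (nn : Int) := ⟨n.toNat, (Int.toNat_of_nonneg (by omega)).symm⟩
    have hnn : 1 ≤ nn := by exact_mod_cast hn1
    have hcast : ((nn * nn : Nat) : Int) = (nn : Int) * nn := by push_cast; ring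
    have h1t : (1 : Int) ≤ (nn : Int) * nn := by
      have : ((1 * 1 : Nat) : Int) ≤ ((nn * nn : Nat) : Int) := by
        exact_mod_cast Nat.mul_le_mul hnn hnn
      omega
    rw [iddfs_latin_square]
    rw [outer_eq nn hnn (((nn : Int) * nn - 1).toNat) 1 rfl (by omega) h1t]
    have hF0 : (((nn : Int) * nn).toNat) = nn * nn := by omega
    rw [hF0, initStA_eq, dls_top nn hnn]
    rw [iddfs_latin_square_alt, if_neg (by omega)]
    have hgrid0 : (PySem.List.pyRange 0 (nn : Int) 1).map
        (fun _ => List.replicate ((nn : Int)).toNat 0) = gridOf nn [] := by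
      rw [gridOf, show ((nn : Int)).toNat = nn by simp, map_const_pyRange]
    rw [hgrid0]
    have hfuel : ((nn : Int).toNat + 2) ^ (((nn : Int) * (nn : Int)).toNat + 1) =
        (nn + 2) ^ (nn * nn + 1) := by
      rw [show ((nn : Int)).toNat = nn by simp, show (((nn : Int) * nn).toNat) = nn * nn by omega]
    rw [hfuel]
    have hmain := mainB nn hnn ((nn + 2) ^ (nn * nn + 1)) [] 1
      ⟨by simp, by intro v hv; simp at hv⟩ (by omega) (by omega) (by omega)
    have h0 : ((List.length ([] : List Int) : Nat) : Int) = 0 := by simp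
    rw [h0] at hmain
    rw [hmain]
    rw [ASide, if_neg (by simp; omega)]
    rcases h1 : tryA nn 1 [] with ⟨b, st⟩
    cases b
    · dsimp only
      rw [unwind]
    · rfl
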